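-- pv_equiv track=rewrite | github.com/caidevOficial/Python_UTN_Programacion_1_C1_div_313 | des_1/validaciones.py | es_string_numerico_valido
-- ===== SOURCE A (Python) =====
-- def es_string_numerico_valido(num_str: str) -> bool:
--     # -1000
--     indice_guion = None
--     cantidad_actual_guion = 0
--     guion_indice_correcto = False
--     resto_elementos_num = True
--
--     for indice_carac in range(len(num_str)):
--         if num_str[indice_carac] == '-':
--             indice_guion = indice_carac
--             cantidad_actual_guion += 1
--
--     ##########################################
--     if indice_guion == None:
--         indice_comienzo_validacion = 0
--     elif indice_guion == 0:
--         indice_comienzo_validacion = 1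
--         guion_indice_correcto = True
--     else:
--         return False
--
--     for indice_carac in range(indice_comienzo_validacion, len(num_str)):
--         if not num_str[indice_carac].isnumeric():
--             resto_elementos_num = False
--             break
--
--     positivo_valido = resto_elementos_num and indice_guion == None
--     negativo_valido = resto_elementos_num and guion_indice_correcto
--
--     return positivo_valido or negativo_valido
-- ===== SOURCE B (Python) =====
-- def es_string_numerico_valido(num_str: str) -> bool:
--     # One-pass deterministic automaton: state 0 = start (a '-' is still allowed),
--     # state 1 = past the optional sign (only numeric characters allowed).
--     # Every live state accepts (an empty or sign-only string is valid, as in A).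
--     state = 0
--     for c in num_str:
--         if state == 0 and c == '-':
--             state = 1
--         elif c.isnumeric():
--             state = 1
--         else:
--             return False
--     return True
-- ===== Notes on version B (the rewrite author's own statement) =====
-- stated objective: alternative
-- what changed: A makes two staged passes (one full scan recording the last dash index and count, then an index-range scan validating the suffix); B is a single-pass two-state automaton that consumes each character once, allows a dash only in the start state, and returns False at the first invalid character, so it never completes a full scan on invalid input.
import Mathlib
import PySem

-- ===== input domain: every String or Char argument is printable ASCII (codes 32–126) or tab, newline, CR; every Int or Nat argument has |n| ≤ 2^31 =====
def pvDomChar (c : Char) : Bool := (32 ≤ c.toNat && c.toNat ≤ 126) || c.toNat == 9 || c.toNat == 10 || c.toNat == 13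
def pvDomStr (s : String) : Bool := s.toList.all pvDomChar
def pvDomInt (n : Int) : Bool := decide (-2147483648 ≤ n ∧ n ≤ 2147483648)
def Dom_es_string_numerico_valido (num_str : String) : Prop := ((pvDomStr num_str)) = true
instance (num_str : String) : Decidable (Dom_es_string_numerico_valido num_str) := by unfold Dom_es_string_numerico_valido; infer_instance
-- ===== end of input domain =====

-- B replaces A's two staged scans (last-dash bookkeeping, then suffix validation)
-- by a single-pass two-state automaton (objective: alternative; a timing run measured B faster via its early return).

-- ===== PORT A =====
-- first loop: for i in range(len): record (last) dash index and dash count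
-- (fold over the indexed characters; faithful to Python's index loop since every
-- index is in range).  str.isnumeric is exact on the printable-ASCII domain as
-- PySem.Chars.isdigit.
def esLoop1 (cs : List (Char × Nat)) (st : Option Nat × Nat) : Option Nat × Nat :=
  cs.foldl (fun st ci => if ci.1 = '-' then (some ci.2, st.2 + 1) else st) st

def es_string_numerico_valido (num_str : String) : Bool :=
  let cs := num_str.toList
  let r := esLoop1 (cs.zipIdx) (none, 0)
  match r.1 with
  | none =>
      -- indice_comienzo_validacion = 0, guion_indice_correcto = False
      let resto := (cs.drop 0).all (fun c => PySem.Chars.isdigit c)  -- second loop with break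
      (resto && true) || (resto && false)   -- positivo_valido || negativo_valido
  | some 0 =>
      -- indice_comienzo_validacion = 1, guion_indice_correcto = True
      let resto := (cs.drop 1).all (fun c => PySem.Chars.isdigit c)
      (resto && false) || (resto && true)
  | some _ => false

-- ===== PORT B =====
-- the for-loop with early return, as structural recursion over the characters,
-- carrying the automaton state (0 = start, 1 = past the optional sign);
-- isnumeric is exact on the printable-ASCII domain as PySem.Chars.isdigit.
def altRun : List Char → Nat → Bool
  | [], _ => true
  | c :: t, st =>
      if st = 0 ∧ c = '-' then altRun t 1
      else if PySem.Chars.isdigit c then altRun t 1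
      else false

def es_string_numerico_valido_alt (num_str : String) : Bool :=
  altRun num_str.toList 0

-- ===== PRECONDITION & SPEC =====
def Spec_es_string_numerico_valido (num_str : String) (out : Bool) : Prop := out = es_string_numerico_valido_alt num_str
instance (num_str : String) (out : Bool) : Decidable (Spec_es_string_numerico_valido num_str out) := by unfold Spec_es_string_numerico_valido; infer_instance

-- ===== CLAIM (what is proved, stated in full; the proofs are below) =====
def Claim_equal_es_string_numerico_valido : Prop := ∀ (num_str : String), Dom_es_string_numerico_valido num_str → Spec_es_string_numerico_valido num_str (es_string_numerico_valido num_str)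

-- ===== LEMMAS AND PROOFS =====

-- In state 1 the automaton just checks that every remaining character is numeric.
theorem altRun_one (t : List Char) : altRun t 1 = t.all (fun c => PySem.Chars.isdigit c) := by
  induction t with
  | nil => rfl
  | cons c s ih =>
      simp only [altRun, List.all_cons]
      rw [if_neg (by simp)]
      by_cases h : PySem.Chars.isdigit c
      · rw [if_pos h, ih]; simp [h]
      · rw [if_neg h]; simp [h]

-- a list containing '-' is not all-numeric
theorem all_digit_false_of_dash {t : List Char} (h : '-' ∈ t) :
    t.all (fun c => PySem.Chars.isdigit c) = false := by
  refine List.all_eq_false.mpr ⟨'-', h, by decide⟩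

-- If no dash occurs, loop1 leaves the recorded index unchanged.
theorem esLoop1_no_dash (cs : List (Char × Nat)) (st : Option Nat × Nat)
    (h : ∀ ci ∈ cs, ci.1 ≠ '-') : (esLoop1 cs st).1 = st.1 := by
  induction cs generalizing st with
  | nil => rfl
  | cons c t ih =>
      simp only [esLoop1, List.foldl_cons] at *
      rw [if_neg (h c (by simp))]
      exact ih st (fun ci hci => h ci (by simp [hci]))

-- If some dash occurs, loop1 records the index of some dash of the list.
theorem esLoop1_dash (cs : List (Char × Nat)) (st : Option Nat × Nat)
    (h : ∃ ci ∈ cs, ci.1 = '-') :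
    ∃ k, (esLoop1 cs st).1 = some k ∧ ('-', k) ∈ cs := by
  induction cs generalizing st with
  | nil => simp at h
  | cons c t ih =>
      simp only [esLoop1, List.foldl_cons]
      by_cases hd : ∃ ci ∈ t, ci.1 = '-'
      · obtain ⟨k, hk, hm⟩ := ih _ hd
        exact ⟨k, hk, by simp [hm]⟩
      · rcases h with ⟨ci, hci, hdd⟩
        rcases List.mem_cons.mp hci with rfl | hmem
        · rw [if_pos hdd]
          refine ⟨ci.2, esLoop1_no_dash t _ (fun x hx hx' => hd ⟨x, hx, hx'⟩), ?_⟩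
          have : ci = ('-', ci.2) := Prod.ext hdd rfl
          simp [← this]
        · exact absurd ⟨ci, hmem, hdd⟩ hd

theorem esLoop1_cons (c : Char) (k : Nat) (rest : List (Char × Nat)) (st : Option Nat × Nat) :
    esLoop1 ((c, k) :: rest) st
      = esLoop1 rest (if c = '-' then (some k, st.2 + 1) else st) := by
  simp [esLoop1]

-- a dash occurs in t iff some indexed pair of t.zipIdx n carries a dash
theorem dash_mem_zipIdx (t : List Char) (n : Nat) :
    ('-' ∈ t) ↔ ∃ ci ∈ t.zipIdx n, (ci : Char × Nat).1 = '-' := by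
  induction t generalizing n with
  | nil => simp
  | cons a s ih =>
      simp only [List.zipIdx_cons, List.mem_cons]
      constructor
      · rintro (rfl | hm)
        · exact ⟨('-', n), Or.inl rfl, rfl⟩
        · obtain ⟨ci, hci, hd⟩ := (ih (n + 1)).mp hm
          exact ⟨ci, Or.inr hci, hd⟩
      · rintro ⟨ci, hci, hd⟩
        rcases hci with rfl | hci
        · exact Or.inl hd.symm
        · exact Or.inr ((ih (n + 1)).mpr ⟨ci, hci, hd⟩)

theorem es_main (num_str : String) :
    es_string_numerico_valido num_str = es_string_numerico_valido_alt num_str := by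
  unfold es_string_numerico_valido es_string_numerico_valido_alt
  cases hcs : num_str.toList with
  | nil => rfl
  | cons c t =>
      simp only [List.zipIdx_cons, List.drop_succ_cons, List.drop_zero, zero_add, esLoop1_cons,
        altRun]
      by_cases hdash : '-' ∈ t
      · -- a dash in the tail: A records a last-dash index ≥ 1 and returns False;
        -- B reaches state 1 (or dies at the head) and fails on the tail's dash.
        obtain ⟨k, hk, hm⟩ :=
          esLoop1_dash (t.zipIdx 1) (if c = '-' then ((some 0 : Option Nat), ((none, 0) : Option Nat × Nat).2 + 1) else ((none, 0) : Option Nat × Nat))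
            ((dash_mem_zipIdx t 1).mp hdash)
        have hk1 : 1 ≤ k := (List.mem_zipIdx hm).1
        rw [show (esLoop1 (t.zipIdx 1)
              (if c = '-' then ((some 0 : Option Nat), ((none, 0) : Option Nat × Nat).2 + 1) else ((none, 0) : Option Nat × Nat))).1 = some k from hk]
        have htail : altRun t 1 = false := by
          rw [altRun_one]; exact all_digit_false_of_dash hdash
        obtain ⟨m, rfl⟩ : ∃ m, k = m + 1 := ⟨k - 1, by omega⟩
        by_cases hc : c = '-'
        · rw [if_pos (by simp [hc]), htail]; rfl
        · rw [if_neg (by simp [hc])]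
          by_cases hdig : PySem.Chars.isdigit c
          · rw [if_pos hdig, htail]; rfl
          · rw [if_neg hdig]; rfl
      · -- no dash in the tail
        have hstay : ∀ st : Option Nat × Nat, (esLoop1 (t.zipIdx 1) st).1 = st.1 := fun st =>
          esLoop1_no_dash _ st (fun ci hci hd => hdash ((dash_mem_zipIdx t 1).mpr ⟨ci, hci, hd⟩))
        by_cases hc : c = '-'
        · rw [if_pos hc, hstay, if_pos (by simp [hc]), altRun_one]
          simp
        · rw [if_neg hc, hstay, if_neg (by simp [hc])]
          by_cases hdig : PySem.Chars.isdigit c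
          · rw [if_pos hdig, altRun_one]
            simp [hdig]
          · rw [if_neg hdig]
            simp [hdig]

-- ===== VERDICT (by name: the statement is the Claim_ definition above) =====
theorem es_string_numerico_valido_spec : Claim_equal_es_string_numerico_valido := by
  intro s _
  exact es_main s
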